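-- pv_equiv track=rewrite | github.com/sarishtshreshth0/plag_extract | Project_CodeNet_Python800/p03104/s026430879.py | calc
-- ===== SOURCE A (Python) =====
-- def calc(n):
--     if n % 2 == 1:
--         if (n + 1) % 4 == 0:
--             return 0
--         else:
--             return 1
--     else:
--         return calc(n-1) ^ n
-- ===== SOURCE B (Python) =====
-- def calc(n):
--     r = n % 4
--     if r == 1:
--         return 1
--     if r == 3:
--         return 0
--     if r == 0:
--         return 0 ^ n
--     return 1 ^ n
-- ===== Notes on version B (the rewrite author's own statement) =====
-- stated objective: simpler
-- what changed: Replaces the parity-check-then-recurse structure with a direct four-way dispatch on the residue of n modulo four, eliminating recursion entirely.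
import Mathlib
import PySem

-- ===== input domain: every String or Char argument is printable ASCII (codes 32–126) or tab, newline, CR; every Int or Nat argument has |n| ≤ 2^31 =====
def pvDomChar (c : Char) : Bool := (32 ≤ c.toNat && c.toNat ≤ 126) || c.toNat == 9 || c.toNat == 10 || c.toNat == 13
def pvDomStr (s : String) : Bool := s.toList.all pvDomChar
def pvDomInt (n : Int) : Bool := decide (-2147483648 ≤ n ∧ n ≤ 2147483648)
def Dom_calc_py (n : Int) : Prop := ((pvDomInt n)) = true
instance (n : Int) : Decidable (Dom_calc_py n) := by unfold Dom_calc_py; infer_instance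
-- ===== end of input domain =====

-- B replaces A's parity-check-then-recurse with a direct four-way dispatch on n % 4 (simpler, no recursion).

-- ===== PORT A =====
def calc_py (n : Int) : Int :=
  if PySem.Int.mod n 2 == 1 then
    if PySem.Int.mod (n + 1) 4 == 0 then 0 else 1
  else
    PySem.Int.bxor (calc_py (n - 1)) n
termination_by (if PySem.Int.mod n 2 == 1 then 0 else 1 : Nat)
decreasing_by
  rename_i h
  simp only [beq_iff_eq] at *
  have h2 := PySem.Int.mod_eq_emod_of_pos (a := n) (b := 2) (by omega)
  have h3 := PySem.Int.mod_eq_emod_of_pos (a := n - 1) (b := 2) (by omega)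
  simp only [beq_iff_eq, h2, h3] at *
  split_ifs at * <;> omega

-- ===== PORT B =====
def calc_py_alt (n : Int) : Int :=
  let r := PySem.Int.mod n 4
  if r == 1 then 1
  else if r == 3 then 0
  else if r == 0 then PySem.Int.bxor 0 n
  else PySem.Int.bxor 1 n

-- ===== PRECONDITION & SPEC =====
def Spec_calc_py (n : Int) (out : Int) : Prop := out = calc_py_alt n
instance (n : Int) (out : Int) : Decidable (Spec_calc_py n out) := by unfold Spec_calc_py; infer_instance

-- ===== CLAIM (what is proved, stated in full; the proofs are below) =====
def Claim_equal_calc_py : Prop := ∀ (n : Int), Dom_calc_py n → Spec_calc_py n (calc_py n)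

-- ===== LEMMAS AND PROOFS =====

theorem mod4_facts (n : Int) : PySem.Int.mod n 4 = n % 4 ∧ PySem.Int.mod n 2 = n % 2 ∧ PySem.Int.mod (n+1) 4 = (n+1) % 4 ∧ PySem.Int.mod n 4 = n % 4 := by
  refine ⟨?_, ?_, ?_, ?_⟩ <;> exact PySem.Int.mod_eq_emod_of_pos (by omega)

-- calc_py on an odd argument, stated via n % 4
theorem calc_py_odd (n : Int) (h1 : n % 4 = 1) : calc_py n = 1 := by
  rw [calc_py]
  obtain ⟨hm4, hm2, hm41, -⟩ := mod4_facts n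
  have e2 : n % 2 = 1 := by omega
  have e41 : (n + 1) % 4 = 2 := by omega
  simp [hm2, hm41, e2, e41]

theorem calc_py_odd3 (n : Int) (h1 : n % 4 = 3) : calc_py n = 0 := by
  rw [calc_py]
  obtain ⟨hm4, hm2, hm41, -⟩ := mod4_facts n
  have e2 : n % 2 = 1 := by omega
  have e41 : (n + 1) % 4 = 0 := by omega
  simp [hm2, hm41, e2, e41]

-- ===== VERDICT (by name: the statement is the Claim_ definition above) =====
theorem calc_py_spec : Claim_equal_calc_py := by
  intro n _
  unfold Spec_calc_py calc_py_alt
  obtain ⟨hm4, hm2, hm41, -⟩ := mod4_facts n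
  have h4 := Int.emod_emod_of_dvd n (by norm_num : (2:Int) ∣ 4)
  have hlt := Int.emod_lt_of_pos n (by omega : (0:Int) < 4)
  have hge := Int.emod_nonneg n (by omega : (4:Int) ≠ 0)
  interval_cases h : n % 4
  · -- n % 4 = 0 : A = bxor (calc (n-1)) n, calc(n-1)=0 since (n-1)%4=3
    have e2 : n % 2 = 0 := by omega
    have : calc_py n = PySem.Int.bxor (calc_py (n - 1)) n := by
      rw [calc_py]; simp [hm2, e2]
    rw [this, calc_py_odd3 (n-1) (by omega)]
    simp [hm4, h]
  · rw [calc_py_odd n h]; simp [hm4, h]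
  · have e2 : n % 2 = 0 := by omega
    have : calc_py n = PySem.Int.bxor (calc_py (n - 1)) n := by
      rw [calc_py]; simp [hm2, e2]
    rw [this, calc_py_odd (n-1) (by omega)]
    simp [hm4, h]
  · rw [calc_py_odd3 n h]; simp [hm4, h]
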